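-- pv_equiv track=rewrite | github.com/crun840130/hw3 | data_prepro.py | toDigitLabel
-- ===== SOURCE A (Python) =====
-- def toDigitLabel(labels):
--     label2digit = {}
--     digit2label = []
--     digit_label = []
--     for l in labels:
--         if l in label2digit:
--             digit_label.append(label2digit[l])
--         else:
--             label2digit[l] = len(digit2label)
--             digit_label.append(len(digit2label))
--             digit2label.append(l)
--     return label2digit, digit2label, digit_label
-- ===== SOURCE B (Python) =====
-- def toDigitLabel(labels):
--     labels = list(labels)
--     uniq = list(dict.fromkeys(labels))
--     label2digit = {l: i for i, l in enumerate(uniq)}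
--     digit_label = [label2digit[l] for l in labels]
--     return label2digit, uniq, digit_label
-- ===== Notes on version B (the rewrite author's own statement) =====
-- stated objective: idiomatic
-- what changed: Replaces A's single interleaved loop that grows three structures at once with a dedup-first decomposition: order-preserving dedup via dict.fromkeys, an enumerate-built index table, then a lookup pass for the digit labels.
import Mathlib
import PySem

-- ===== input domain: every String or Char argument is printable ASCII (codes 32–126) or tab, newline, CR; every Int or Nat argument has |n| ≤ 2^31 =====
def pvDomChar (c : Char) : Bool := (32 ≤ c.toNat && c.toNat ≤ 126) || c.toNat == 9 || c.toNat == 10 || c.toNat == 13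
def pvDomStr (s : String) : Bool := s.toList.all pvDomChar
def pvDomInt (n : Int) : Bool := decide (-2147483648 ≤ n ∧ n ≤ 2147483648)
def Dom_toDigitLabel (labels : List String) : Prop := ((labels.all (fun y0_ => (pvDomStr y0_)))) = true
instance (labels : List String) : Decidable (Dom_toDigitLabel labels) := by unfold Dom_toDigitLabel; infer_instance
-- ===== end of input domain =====

-- B re-implements A by a dedup-first decomposition (ordered dedup, then an enumerate-built
-- index table, then a lookup pass) instead of A's single loop growing three structures; same
-- return value, objective: idiomatic.

-- ===== PORT A =====
-- A's loop body: membership test on the dict, then either append the stored id or assign a new one.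
def pvAStep (st : PySem.Dict String Int × List String × List Int) (l : String) :
    PySem.Dict String Int × List String × List Int :=
  match st.1.get? l with                                    -- 'if l in label2digit: … label2digit[l]'
  | some v => (st.1, st.2.1, st.2.2 ++ [v])
  | none =>
      (st.1.insert l (st.2.1.length : Int),                 -- label2digit[l] = len(digit2label)
       st.2.1 ++ [l],                                       -- digit2label.append(l)
       st.2.2 ++ [(st.2.1.length : Int)])                   -- digit_label.append(len(digit2label))

def toDigitLabel (labels : List String) : (List (String × Int)) × List String × List Int :=
  let st := labels.foldl pvAStep (PySem.Dict.empty, [], [])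
  (st.1.items, st.2.1, st.2.2)

-- ===== PORT B =====
-- '{l: i for i, l in enumerate(uniq)}' insertion step
def pvBIns (d : PySem.Dict String Int) (p : Int × String) : PySem.Dict String Int :=
  d.insert p.2 p.1

def toDigitLabel_alt (labels : List String) : (List (String × Int)) × List String × List Int :=
  let uniq := PySem.List.dedup labels                       -- list(dict.fromkeys(labels))
  let label2digit := (PySem.List.enumerate uniq).foldl pvBIns PySem.Dict.empty
  -- 'label2digit[l]': every l ∈ labels is a key of label2digit, so the KeyError branch is unreachable
  let digit_label := labels.map (fun l => label2digit.getD l 0)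
  (label2digit.items, uniq, digit_label)

-- ===== PRECONDITION & SPEC =====
def Spec_toDigitLabel (labels : List String) (out : (List (String × Int)) × List String × List Int) : Prop := out = toDigitLabel_alt labels
instance (labels : List String) (out : (List (String × Int)) × List String × List Int) : Decidable (Spec_toDigitLabel labels out) := by unfold Spec_toDigitLabel; infer_instance

-- ===== CLAIM (what is proved, stated in full; the proofs are below) =====
def Claim_equal_toDigitLabel : Prop := ∀ (labels : List String), Dom_toDigitLabel labels → Spec_toDigitLabel labels (toDigitLabel labels)

-- ===== LEMMAS AND PROOFS =====

theorem pv_set_contains_iff (u : List String) (a : String) :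
    PySem.Set.contains u a = true ↔ a ∈ u := by
  simp [PySem.Set.contains]

-- B's index dict built from 'enumerate u s', starting from d
def pvDOf (d : PySem.Dict String Int) (s : Int) (u : List String) : PySem.Dict String Int :=
  (PySem.List.enumerate u s).foldl pvBIns d

theorem pvDOf_cons (d : PySem.Dict String Int) (s : Int) (x : String) (u : List String) :
    pvDOf d s (x :: u) = pvDOf (d.insert x s) (s + 1) u := by
  simp [pvDOf, PySem.List.enumerate_cons, pvBIns]

theorem pvDOf_get? (u : List String) (d : PySem.Dict String Int) (s : Int) (x : String)
    (hu : u.Nodup) :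
    (pvDOf d s u).get? x =
      if x ∈ u then some (s + (List.idxOf x u : Int)) else d.get? x := by
  induction u generalizing d s with
  | nil => simp [pvDOf]
  | cons a u ih =>
      rw [pvDOf_cons, ih _ _ (List.Nodup.of_cons hu)]
      by_cases hax : x = a
      · subst hax
        have hxu : x ∉ u := (List.nodup_cons.mp hu).1
        simp [hxu, PySem.Dict.get?_insert_self, List.idxOf_cons_self]
      · by_cases hxu : x ∈ u
        · have hidx : List.idxOf x (a :: u) = List.idxOf x u + 1 :=
            List.idxOf_cons_ne u fun h => hax h.symm
          simp only [hxu, if_pos, List.mem_cons, hax, false_or, hidx]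
          push_cast
          ring_nf
        · simp [hxu, hax, PySem.Dict.get?_insert]

theorem pvDOf_append (u : List String) (d : PySem.Dict String Int) (s : Int) (l : String) :
    pvDOf d s (u ++ [l]) = (pvDOf d s u).insert l (s + (u.length : Int)) := by
  induction u generalizing d s with
  | nil => simp [pvDOf, PySem.List.enumerate_cons, PySem.List.enumerate_nil, pvBIns]
  | cons a u ih =>
      rw [List.cons_append, pvDOf_cons, pvDOf_cons, ih]
      congr 1
      simp only [List.length_cons]
      push_cast
      ring

-- index of an old element is stable under further Set.add / Set.update
theorem pv_idxOf_update (v u : List String) (l : String) (hl : l ∈ u) :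
    List.idxOf l (PySem.Set.update u v) = List.idxOf l u ∧ l ∈ PySem.Set.update u v := by
  induction v generalizing u with
  | nil => exact ⟨rfl, hl⟩
  | cons a v ih =>
      rw [PySem.Set.update_eq_foldl, List.foldl_cons, ← PySem.Set.update_eq_foldl]
      by_cases ha : PySem.Set.contains u a = true
      · have ha' : a ∈ u := (pv_set_contains_iff u a).mp ha
        have : PySem.Set.add u a = u := by simp [PySem.Set.add, ha']
        rw [this]; exact ih u hl
      · have hmem : a ∉ u := fun h => ha ((pv_set_contains_iff u a).mpr h)
        have : PySem.Set.add u a = u ++ [a] := by simp [PySem.Set.add, hmem]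
        rw [this]
        have h2 := ih (u ++ [a]) (by simp [hl])
        exact ⟨by rw [h2.1, List.idxOf_append_of_mem hl], h2.2⟩

-- characterisation of A's loop: from a state built out of a nodup uniq list u
theorem pvA_loop (rest : List String) (u : List String) (dl : List Int) (hu : u.Nodup) :
    rest.foldl pvAStep (pvDOf PySem.Dict.empty 0 u, u, dl) =
      (pvDOf PySem.Dict.empty 0 (PySem.Set.update u rest),
       PySem.Set.update u rest,
       dl ++ rest.map (fun l => (List.idxOf l (PySem.Set.update u rest) : Int))) := by
  induction rest generalizing u dl with
  | nil => simp
  | cons l rest ih =>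
      rw [List.foldl_cons]
      by_cases hl : l ∈ u
      · have hcon : PySem.Set.contains u l = true := (pv_set_contains_iff u l).mpr hl
        have hstep : pvAStep (pvDOf PySem.Dict.empty 0 u, u, dl) l
            = (pvDOf PySem.Dict.empty 0 u, u, dl ++ [(List.idxOf l u : Int)]) := by
          simp [pvAStep, pvDOf_get? u _ _ _ hu, hl]
        have hupd : PySem.Set.update u (l :: rest) = PySem.Set.update u rest := by
          rw [PySem.Set.update_eq_foldl, List.foldl_cons, ← PySem.Set.update_eq_foldl]
          congr 1
          simp [PySem.Set.add, hl]
        rw [hstep, ih u (dl ++ [(List.idxOf l u : Int)]) hu, hupd]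
        have hidx := pv_idxOf_update rest u l hl
        simp [hidx.1]
      · have hcon : ¬ PySem.Set.contains u l = true :=
          fun h => hl ((pv_set_contains_iff u l).mp h)
        have hstep : pvAStep (pvDOf PySem.Dict.empty 0 u, u, dl) l
            = (pvDOf PySem.Dict.empty 0 (u ++ [l]), u ++ [l], dl ++ [(u.length : Int)]) := by
          simp [pvAStep, pvDOf_get? u _ _ _ hu, hl, pvDOf_append]
        have hupd : PySem.Set.update u (l :: rest) = PySem.Set.update (u ++ [l]) rest := by
          rw [PySem.Set.update_eq_foldl, List.foldl_cons, ← PySem.Set.update_eq_foldl]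
          congr 1
          simp [PySem.Set.add, hl]
        have hnd : (u ++ [l]).Nodup := by
          simp [List.nodup_append, hu]
          exact fun b hb hbl => hl (hbl ▸ hb)
        rw [hstep, ih (u ++ [l]) (dl ++ [(u.length : Int)]) hnd, hupd]
        have hidx := pv_idxOf_update rest (u ++ [l]) l (by simp)
        have hlen : List.idxOf l (u ++ [l]) = u.length := by
          rw [List.idxOf_append_of_notMem hl]
          simp
        simp [hidx.1, hlen]

-- ===== VERDICT (by name: the statement is the Claim_ definition above) =====
theorem toDigitLabel_spec : Claim_equal_toDigitLabel := by
  intro labels _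
  unfold Spec_toDigitLabel toDigitLabel toDigitLabel_alt
  have h := pvA_loop labels [] [] List.nodup_nil
  have hded : PySem.Set.update [] labels = PySem.List.dedup labels := by
    rw [PySem.List.dedup_eq_ofList, PySem.Set.ofList_eq_foldl, PySem.Set.update_eq_foldl]
  rw [show ((PySem.Dict.empty : PySem.Dict String Int), ([] : List String), ([] : List Int))
        = (pvDOf PySem.Dict.empty 0 [], [], []) from rfl]
  rw [hded] at h
  rw [h]
  refine congrArg _ ?_
  refine congrArg _ ?_
  apply List.map_congr_left
  intro l hl
  have hnd : (PySem.List.dedup labels).Nodup := PySem.List.nodup_dedup labels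
  rw [PySem.Dict.getD_eq_get?_getD]
  rw [show (PySem.List.enumerate (PySem.List.dedup labels)).foldl pvBIns PySem.Dict.empty
        = pvDOf PySem.Dict.empty 0 (PySem.List.dedup labels) from rfl]
  rw [pvDOf_get? _ _ _ _ hnd]
  simp [hl]
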